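-- pv_equiv track=rewrite | github.com/GitMonsters/octotetrahedral-agi | arc-puzzle-catalog/re-arc/solves/76e31177/solver.py | transform
-- ===== SOURCE A (Python) =====
-- from collections import Counter
--
-- def transform(grid):
--     rows, cols = len(grid), len(grid[0])
--
--     # Find background color
--     cnt = Counter()
--     for r in grid:
--         for c in r:
--             cnt[c] += 1
--     bg = cnt.most_common(1)[0][0]
--
--     result = [row[:] for row in grid]
--
--     # For each non-bg pixel, extend downward with alternating pattern
--     for r in range(rows):
--         for c in range(cols):
--             if grid[r][c] != bg:
--                 color = grid[r][c]
--                 for dr in range(rows - r):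
--                     nr = r + dr
--                     if dr % 2 == 0:
--                         result[nr][c] = color
--                     else:
--                         result[nr][c] = 0
--
--     return result
-- ===== SOURCE B (Python) =====
-- from collections import Counter
--
-- def transform(grid):
--     cols = len(grid[0])
--
--     # Find background color (same rule as before: most common, first seen wins ties)
--     cnt = Counter()
--     for r in grid:
--         for c in r:
--             cnt[c] += 1
--     bg = cnt.most_common(1)[0][0]
--
--     # One top-down pass: per column remember the most recent non-bg source
--     # as (color, even-phase); it alternates color/0 below the source.
--     result = []
--     last = [None] * cols
--     for row in grid:
--         new = list(row)
--         for c in range(cols):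
--             v = row[c]
--             if v != bg:
--                 last[c] = (v, True)
--             elif last[c] is not None:
--                 col, even = last[c]
--                 last[c] = (col, not even)
--             if last[c] is not None:
--                 col, even = last[c]
--                 new[c] = col if even else 0
--         result.append(new)
--     return result
-- ===== Notes on version B (the rewrite author's own statement) =====
-- stated objective: faster
-- what changed: A re-paints the whole column below every non-background pixel (O(rows) work per pixel); B makes a single top-down pass that tracks, per column, the most recent non-background source and its alternating color/0 phase, writing each cell once.
import Mathlib
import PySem

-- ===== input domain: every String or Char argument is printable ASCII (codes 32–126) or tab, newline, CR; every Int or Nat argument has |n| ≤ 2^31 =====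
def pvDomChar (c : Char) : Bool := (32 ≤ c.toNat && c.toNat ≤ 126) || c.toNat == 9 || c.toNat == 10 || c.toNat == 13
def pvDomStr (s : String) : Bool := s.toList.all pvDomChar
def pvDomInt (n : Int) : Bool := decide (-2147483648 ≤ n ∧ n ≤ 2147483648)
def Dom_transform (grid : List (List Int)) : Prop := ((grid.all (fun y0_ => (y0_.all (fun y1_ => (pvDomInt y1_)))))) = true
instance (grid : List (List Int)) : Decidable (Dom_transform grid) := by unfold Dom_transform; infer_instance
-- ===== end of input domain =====

-- B replaces A's "re-paint the whole column below every non-bg pixel" loops (quadratic in the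
-- number of rows) by a single top-down pass that tracks, per column, the most recent non-bg
-- source and its alternating phase (objective: faster).

-- ===== PORT A =====
-- grid[r][c]; every read/write index is in range on inputs admitted by Pre_transform below
def gget (grid : List (List Int)) (r c : Nat) : Int := (grid.getD r []).getD c 0

-- shared helper: both Pythons find bg with the identical Counter / most_common(1) lines
-- (most_common(1)[0][0] = first key, in first-insertion order, with maximal count)
def findBg (grid : List (List Int)) : Int :=
  let cnt : PySem.Dict Int Int :=
    grid.foldl (fun d row => row.foldl (fun d v => d.modify v 0 (· + 1)) d) PySem.Dict.empty
  match cnt.items.foldl (fun (best : Option (Int × Int)) kv =>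
      match best with
      | none => some kv
      | some b => if kv.2 > b.2 then some kv else best) none with
  | some kv => kv.1
  | none => 0

def transform (grid : List (List Int)) : List (List Int) :=
  let rows := grid.length
  let cols := (grid.headD []).length
  let bg := findBg grid
  let result := grid.map (fun row => row)
  (List.range rows).foldl (fun result r =>
    (List.range cols).foldl (fun result c =>
      if gget grid r c ≠ bg then
        let color := gget grid r c
        (List.range (rows - r)).foldl (fun result dr =>
          let nr := r + dr
          result.set nr ((result.getD nr []).set c (if dr % 2 == 0 then color else 0))) result
      else result) result) result

-- ===== PORT B =====
def transform_alt (grid : List (List Int)) : List (List Int) :=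
  let cols := (grid.headD []).length
  let bg := findBg grid
  (grid.foldl (fun (st : List (List Int) × List (Option (Int × Bool))) row =>
    let p := (List.range cols).foldl (fun (p : List Int × List (Option (Int × Bool))) c =>
      let v := row.getD c 0
      let last :=
        if v ≠ bg then p.2.set c (some (v, true))
        else match p.2.getD c none with
          | some (col, even) => p.2.set c (some (col, !even))
          | none => p.2
      match last.getD c none with
      | some (col, even) => (p.1.set c (if even then col else 0), last)
      | none => (p.1, last)) (row, st.2)
    (st.1 ++ [p.1], p.2)) ([], List.replicate cols none)).1

-- ===== PRECONDITION & SPEC =====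
-- Pre_ excludes exactly the inputs on which the Python A raises IndexError: the empty grid,
-- grids all of whose rows are empty (Counter.most_common(1)[0] fails), and grids with some
-- row shorter than the first row (reading grid[r][c] / writing result[nr][c] fails).
-- B raises IndexError on exactly the same inputs.
def Pre_transform (grid : List (List Int)) : Prop :=
  grid ≠ [] ∧ (∃ row ∈ grid, row ≠ []) ∧ ∀ row ∈ grid, (grid.headD []).length ≤ row.length
instance (grid : List (List Int)) : Decidable (Pre_transform grid) := by
  unfold Pre_transform; infer_instance
def pvWitness_transform : List (List Int) := [[1, 0, 0], [0, 0, 0], [0, 2, 0]]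

def Spec_transform (grid : List (List Int)) (out : List (List Int)) : Prop := out = transform_alt grid
instance (grid : List (List Int)) (out : List (List Int)) : Decidable (Spec_transform grid out) := by unfold Spec_transform; infer_instance

-- ===== CLAIM (what is proved, stated in full; the proofs are below) =====
def Claim_equal_transform : Prop := ∀ (grid : List (List Int)), Dom_transform grid → Pre_transform grid → Spec_transform grid (transform grid)

-- ===== LEMMAS AND PROOFS =====
lemma getD_set {α : Type} (l : List α) (n i : Nat) (a d : α) :
    (l.set n a).getD i d = if n = i ∧ n < l.length then a else l.getD i d := by
  simp only [List.getD_eq_getElem?_getD, List.getElem?_set]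
  by_cases h : n = i ∧ n < l.length
  · obtain ⟨rfl, hl⟩ := h
    simp [hl]
  · split_ifs with h1 h2 <;> simp_all <;> omega

lemma ext2 (xs ys : List (List Int)) (h1 : xs.length = ys.length)
    (h2 : ∀ i, (xs.getD i []).length = (ys.getD i []).length)
    (h3 : ∀ i j, (xs.getD i []).getD j 0 = (ys.getD i []).getD j 0) : xs = ys := by
  apply List.ext_getElem h1
  intro i hi hi'
  apply List.ext_getElem
  · have := h2 i
    simpa [List.getD_eq_getElem?_getD, List.getElem?_eq_getElem, hi, hi'] using this
  · intro j hj hj'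
    have := h3 i j
    simp only [List.getD_eq_getElem?_getD, List.getElem?_eq_getElem, hi, hi'] at this
    simpa [List.getElem?_eq_getElem, hj, hj'] using this

lemma foldl_range_inv {α : Type} (P : Nat → α → Prop) (f : α → Nat → α) (n : Nat) (a : α)
    (h0 : P 0 a) (hs : ∀ k b, k < n → P k b → P (k + 1) (f b k)) :
    P n ((List.range n).foldl f a) := by
  induction n with
  | zero => simpa using h0
  | succ m ih =>
    rw [List.range_succ, List.foldl_append]
    exact hs m _ (Nat.lt_succ_self m) (ih (fun k b hk => hs k b (Nat.lt_succ_of_lt hk)))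

lemma foldl_idx_inv {α β : Type} (l : List β) (P : Nat → α → Prop) (f : α → β → α) (a : α)
    (h0 : P 0 a) (hs : ∀ k b, (h : k < l.length) → P k b → P (k + 1) (f b l[k])) :
    P l.length (l.foldl f a) := by
  induction l generalizing P a with
  | nil => simpa using h0
  | cons x t ih =>
    simp only [List.foldl_cons, List.length_cons]
    have := ih (fun k b => P (k+1) b) (f a x) (hs 0 a (by simp) h0)
      (fun k b hk hb => hs (k+1) b (by simpa using Nat.succ_lt_succ hk) hb)
    simpa using this

def src (grid : List (List Int)) (bg : Int) (c k : Nat) : Option Nat :=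
  ((List.range k).filter (fun r => gget grid r c != bg)).getLast?

lemma src_succ (grid : List (List Int)) (bg : Int) (c k : Nat) :
    src grid bg c (k + 1) = if gget grid k c != bg then some k else src grid bg c k := by
  unfold src
  rw [List.range_succ, List.filter_append]
  by_cases h : gget grid k c != bg
  · simp [h]
  · simp [h]

lemma src_lt (grid : List (List Int)) (bg : Int) (c k r : Nat)
    (h : src grid bg c k = some r) : r < k ∧ gget grid r c ≠ bg := by
  have hm := List.mem_of_getLast? h
  simp only [List.mem_filter, List.mem_range, bne_iff_ne] at hm
  exact hm

def cellv (grid : List (List Int)) (bg : Int) (k nr c : Nat) : Int :=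
  match src grid bg c k with
  | some r => if (nr - r) % 2 = 0 then gget grid r c else 0
  | none => gget grid nr c

def wA (grid : List (List Int)) (bg : Int) (cols k nr c : Nat) : Int :=
  if nr < grid.length ∧ c < (grid.getD nr []).length ∧ c < cols then
    cellv grid bg (min k (nr + 1)) nr c
  else gget grid nr c

def PtA (grid : List (List Int)) (w : Nat → Nat → Int) (res : List (List Int)) : Prop :=
  res.length = grid.length ∧ (∀ i, (res.getD i []).length = (grid.getD i []).length) ∧
  ∀ i j, (res.getD i []).getD j 0 = w i j

def wStep (grid : List (List Int)) (w : Nat → Nat → Int) (r c m : Nat) (color : Int)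
    (i j : Nat) : Int :=
  if r ≤ i ∧ i < r + m ∧ j = c ∧ j < (grid.getD i []).length ∧ i < grid.length
    then (if (i - r) % 2 = 0 then color else 0) else w i j

lemma writeCol_inv (grid : List (List Int)) (w : Nat → Nat → Int) (res : List (List Int))
    (r c : Nat) (color : Int) (m : Nat) (h : PtA grid w res) :
    PtA grid (wStep grid w r c m color)
      ((List.range m).foldl (fun result dr =>
          result.set (r + dr) ((result.getD (r + dr) []).set c
            (if dr % 2 == 0 then color else 0))) res) := by
  apply foldl_range_inv (P := fun dr out => PtA grid (wStep grid w r c dr color) out)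
  · obtain ⟨h1, h2, h3⟩ := h
    refine ⟨h1, h2, fun i j => ?_⟩
    rw [h3 i j]
    have : ¬ (r ≤ i ∧ i < r + 0 ∧ j = c ∧ j < (grid.getD i []).length ∧ i < grid.length) := by
      rintro ⟨a, b, _⟩; omega
    rw [wStep, if_neg this]
  · intro dr out _ hP
    obtain ⟨h1, h2, h3⟩ := hP
    have hv : (if (dr % 2 == 0) then color else (0:Int)) = (if dr % 2 = 0 then color else 0) := by
      by_cases hp : dr % 2 = 0 <;> simp [hp]
    rw [hv]
    set v := if dr % 2 = 0 then color else (0:Int) with hv2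
    refine ⟨by simpa using h1, fun i => ?_, fun i j => ?_⟩
    · rw [getD_set]
      split_ifs with hh
      · obtain ⟨hi, _⟩ := hh
        subst hi
        rw [List.length_set]
        exact h2 _
      · exact h2 i
    · rw [getD_set]
      split_ifs with hh
      · obtain ⟨hi, hlen⟩ := hh
        subst hi
        rw [getD_set]
        have hlen' : (out.getD (r+dr) []).length = (grid.getD (r+dr) []).length := h2 _
        rw [h1] at hlen
        by_cases hc : c = j ∧ c < (out.getD (r+dr) []).length
        · rw [if_pos hc]
          obtain ⟨rfl, hcl⟩ := hc
          have hcond : r ≤ r + dr ∧ r + dr < r + (dr+1) ∧ (c:Nat) = c ∧ c < (grid.getD (r+dr) []).length ∧ r + dr < grid.length := by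
            refine ⟨by omega, by omega, rfl, by omega, hlen⟩
          rw [wStep, if_pos hcond]
          rw [show r + dr - r = dr from by omega]
        · rw [if_neg hc, h3]
          have hnot : ¬ (r ≤ r + dr ∧ r + dr < r + dr ∧ j = c ∧ j < (grid.getD (r+dr) []).length ∧ r + dr < grid.length) := by
            rintro ⟨_, b, _⟩; omega
          rw [wStep, if_neg hnot, wStep]
          by_cases hcond : r ≤ r + dr ∧ r + dr < r + (dr+1) ∧ j = c ∧ j < (grid.getD (r+dr) []).length ∧ r + dr < grid.length
          · exfalso
            obtain ⟨_, _, rfl, hl, _⟩ := hcond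
            exact hc ⟨rfl, by omega⟩
          · rw [if_neg hcond]
      · rw [h3, wStep, wStep]
        by_cases hcond1 : r ≤ i ∧ i < r + dr ∧ j = c ∧ j < (grid.getD i []).length ∧ i < grid.length
        · obtain ⟨a, b, e, d, f⟩ := hcond1
          have hcond : r ≤ i ∧ i < r + (dr+1) ∧ j = c ∧ j < (grid.getD i []).length ∧ i < grid.length :=
            ⟨a, by omega, e, d, f⟩
          rw [if_pos hcond, if_pos ⟨a, b, e, d, f⟩]
        · rw [if_neg hcond1]
          by_cases hcond2 : r ≤ i ∧ i < r + (dr+1) ∧ j = c ∧ j < (grid.getD i []).length ∧ i < grid.length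
          · exfalso
            obtain ⟨a, b, e, d, f⟩ := hcond2
            rcases Nat.lt_succ_iff_lt_or_eq.mp (by omega : i - r < dr + 1) with hlt | heq
            · exact hcond1 ⟨a, by omega, e, d, f⟩
            · exact hh ⟨by omega, by omega⟩
          · rw [if_neg hcond2]

def wMix (grid : List (List Int)) (bg : Int) (cols R C i j : Nat) : Int :=
  if j < C then wA grid bg cols (R+1) i j else wA grid bg cols R i j

lemma PtA_congr (grid : List (List Int)) (w w' : Nat → Nat → Int) (res : List (List Int))
    (h : PtA grid w res) (hw : ∀ i j, w i j = w' i j) : PtA grid w' res :=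
  ⟨h.1, h.2.1, fun i j => (h.2.2 i j).trans (hw i j)⟩

lemma cellv_congr (grid : List (List Int)) (bg : Int) (k k' i c : Nat)
    (h : src grid bg c k = src grid bg c k') : cellv grid bg k i c = cellv grid bg k' i c := by
  unfold cellv; rw [h]

lemma wA_succ_of_src_eq (grid : List (List Int)) (bg : Int) (cols R i j : Nat)
    (h : src grid bg j (R+1) = src grid bg j R) :
    wA grid bg cols (R+1) i j = wA grid bg cols R i j := by
  unfold wA
  split_ifs with hc
  · apply cellv_congr
    rcases Nat.lt_or_ge i R with hi | hi
    · rw [show min (R+1) (i+1) = i + 1 from by omega, show min R (i+1) = i + 1 from by omega]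
    · rw [show min (R+1) (i+1) = R + 1 from by omega, show min R (i+1) = R from by omega, h]
  · rfl

lemma colstep_inv (grid : List (List Int)) (bg : Int) (cols R C : Nat) (res : List (List Int))
    (hR : R < grid.length) (hC : C < cols)
    (hP : PtA grid (wMix grid bg cols R C) res) :
    PtA grid (wMix grid bg cols R (C+1))
      (if gget grid R C ≠ bg then
        (List.range (grid.length - R)).foldl (fun result dr =>
          result.set (R + dr) ((result.getD (R + dr) []).set C
            (if dr % 2 == 0 then gget grid R C else 0))) res
       else res) := by
  by_cases hbg : gget grid R C ≠ bg
  · rw [if_pos hbg]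
    have hsrc : src grid bg C (R+1) = some R := by
      rw [src_succ, if_pos (by simpa using hbg)]
    apply PtA_congr _ _ _ _ (writeCol_inv grid _ res R C (gget grid R C) (grid.length - R) hP)
    intro i j
    unfold wStep
    by_cases hcond : R ≤ i ∧ i < R + (grid.length - R) ∧ j = C ∧ j < (grid.getD i []).length ∧ i < grid.length
    · rw [if_pos hcond]
      obtain ⟨hi1, hi2, rfl, hl, hn⟩ := hcond
      unfold wMix
      rw [if_pos (by omega : j < j + 1)]
      unfold wA
      rw [if_pos (show i < grid.length ∧ j < (grid.getD i []).length ∧ j < cols from ⟨hn, hl, hC⟩)]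
      rw [show min (R+1) (i+1) = R + 1 from by omega]
      simp only [cellv, hsrc]
    · rw [if_neg hcond]
      by_cases hj : j = C
      · subst hj
        by_cases hrange : i < grid.length ∧ j < (grid.getD i []).length
        · have hiR : i < R := by
            rcases Nat.lt_or_ge i R with h' | h'
            · exact h'
            · exact absurd (show R ≤ i ∧ i < R + (grid.length - R) ∧ j = j ∧ j < (grid.getD i []).length ∧ i < grid.length from ⟨h', by omega, rfl, hrange.2, hrange.1⟩) hcond
          unfold wMix
          rw [if_neg (by omega : ¬ j < j), if_pos (by omega : j < j + 1)]
          unfold wA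
          rw [if_pos (show i < grid.length ∧ j < (grid.getD i []).length ∧ j < cols from ⟨hrange.1, hrange.2, hC⟩),
              if_pos (show i < grid.length ∧ j < (grid.getD i []).length ∧ j < cols from ⟨hrange.1, hrange.2, hC⟩)]
          apply cellv_congr
          rw [show min (R+1) (i+1) = i + 1 from by omega, show min R (i+1) = i + 1 from by omega]
        · unfold wMix wA
          have : ¬ (i < grid.length ∧ j < (grid.getD i []).length ∧ j < cols) := by
            rintro ⟨a, b, _⟩; exact hrange ⟨a, b⟩
          rw [if_neg (by omega : ¬ j < j), if_pos (by omega : j < j + 1), if_neg this, if_neg this]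
      · unfold wMix
        by_cases hjC : j < C
        · rw [if_pos hjC, if_pos (by omega : j < C + 1)]
        · rw [if_neg hjC, if_neg (by omega : ¬ j < C + 1)]
  · rw [if_neg hbg]
    apply PtA_congr _ _ _ _ hP
    intro i j
    unfold wMix
    by_cases hj : j = C
    · subst hj
      rw [if_neg (by omega : ¬ j < j), if_pos (by omega : j < j + 1)]
      apply (wA_succ_of_src_eq _ _ _ _ _ _ _).symm
      rw [src_succ, if_neg (by simpa using hbg)]
    · by_cases hjC : j < C
      · rw [if_pos hjC, if_pos (by omega : j < C + 1)]
      · rw [if_neg hjC, if_neg (by omega : ¬ j < C + 1)]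

lemma rowstep_inv (grid : List (List Int)) (bg : Int) (cols R : Nat) (res : List (List Int))
    (hR : R < grid.length) (hP : PtA grid (wA grid bg cols R) res) :
    PtA grid (wA grid bg cols (R+1))
      ((List.range cols).foldl (fun result c =>
        if gget grid R c ≠ bg then
          (List.range (grid.length - R)).foldl (fun result dr =>
            result.set (R + dr) ((result.getD (R + dr) []).set c
              (if dr % 2 == 0 then gget grid R c else 0))) result
        else result) res) := by
  have hmain := foldl_range_inv (P := fun C out => PtA grid (wMix grid bg cols R C) out)
    (f := fun result c =>
      if gget grid R c ≠ bg then
        (List.range (grid.length - R)).foldl (fun result dr =>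
          result.set (R + dr) ((result.getD (R + dr) []).set c
            (if dr % 2 == 0 then gget grid R c else 0))) result
      else result) cols res
    (by
      apply PtA_congr _ _ _ _ hP
      intro i j
      unfold wMix
      rw [if_neg (by omega : ¬ j < 0)])
    (by
      intro C out hC hPC
      exact colstep_inv grid bg cols R C out hR hC hPC)
  apply PtA_congr _ _ _ _ hmain
  intro i j
  unfold wMix
  by_cases hj : j < cols
  · rw [if_pos hj]
  · rw [if_neg hj]
    unfold wA
    have : ¬ (i < grid.length ∧ j < (grid.getD i []).length ∧ j < cols) := by
      rintro ⟨_, _, hh⟩; exact hj hh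
    rw [if_neg this, if_neg this]

lemma transformA_pt (grid : List (List Int)) :
    PtA grid (wA grid (findBg grid) (grid.headD []).length grid.length) (transform grid) := by
  unfold transform
  apply foldl_range_inv (P := fun k out => PtA grid (wA grid (findBg grid) (grid.headD []).length k) out)
  · apply PtA_congr grid (fun i j => gget grid i j)
    · refine ⟨by simp, fun i => by simp, fun i j => by simp [gget]⟩
    · intro i j
      unfold wA cellv src
      simp
  · intro k b hk hPk
    exact rowstep_inv grid (findBg grid) (grid.headD []).length k b hk hPk

def lastSt (grid : List (List Int)) (bg : Int) (k c : Nat) : Option (Int × Bool) :=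
  match src grid bg c k with
  | none => none
  | some r => some (gget grid r c, (k - 1 - r) % 2 == 0)

lemma parity_flip (a : Nat) : (!(a % 2 == 0)) = ((a + 1) % 2 == 0) := by
  rcases Nat.mod_two_eq_zero_or_one a with h | h
  · simp [h, Nat.add_mod]
  · simp [h, Nat.add_mod]

def PB (grid : List (List Int)) (bg : Int) (cols k : Nat)
    (st : List (List Int) × List (Option (Int × Bool))) : Prop :=
  st.1.length = k ∧
  (∀ i, i < k → (st.1.getD i []).length = (grid.getD i []).length) ∧
  (∀ i j, i < k → (st.1.getD i []).getD j 0 = wA grid bg cols grid.length i j) ∧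
  st.2.length = cols ∧
  (∀ c, st.2.getD c none = if c < cols then lastSt grid bg k c else none)

def QB (grid : List (List Int)) (bg : Int) (cols k C : Nat) (row : List Int)
    (p : List Int × List (Option (Int × Bool))) : Prop :=
  p.1.length = row.length ∧
  (∀ j, p.1.getD j 0 = if j < C then wA grid bg cols grid.length k j else row.getD j 0) ∧
  p.2.length = cols ∧
  (∀ c, p.2.getD c none = if c < C then lastSt grid bg (k+1) c
    else if c < cols then lastSt grid bg k c else none)

lemma innerB_step (grid : List (List Int)) (bg : Int) (cols k C : Nat)
    (p : List Int × List (Option (Int × Bool)))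
    (hk : k < grid.length) (hC : C < cols)
    (hQ : QB grid bg cols k C (grid.getD k []) p) :
    QB grid bg cols k (C+1) (grid.getD k [])
      (let v := (grid.getD k []).getD C 0
       let last :=
         if v ≠ bg then p.2.set C (some (v, true))
         else match p.2.getD C none with
           | some (col, even) => p.2.set C (some (col, !even))
           | none => p.2
       match last.getD C none with
       | some (col, even) => (p.1.set C (if even then col else 0), last)
       | none => (p.1, last)) := by
  obtain ⟨q1, q2, q3, q4⟩ := hQ
  have hv : (grid.getD k []).getD C 0 = gget grid k C := rfl
  have hp2C : p.2.getD C none = lastSt grid bg k C := by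
    rw [q4 C, if_neg (by omega : ¬ C < C), if_pos hC]
  set last' := (if (grid.getD k []).getD C 0 ≠ bg then p.2.set C (some ((grid.getD k []).getD C 0, true))
        else match p.2.getD C none with
          | some (col, even) => p.2.set C (some (col, !even))
          | none => p.2) with hdef
  have key : last'.length = cols ∧ last'.getD C none = lastSt grid bg (k+1) C ∧
      (∀ c, c ≠ C → last'.getD c none = p.2.getD c none) := by
    by_cases hbg : (grid.getD k []).getD C 0 ≠ bg
    · have hbg' : gget grid k C ≠ bg := by rw [← hv]; exact hbg
      rw [hdef, if_pos hbg]
      refine ⟨by rw [List.length_set, q3], ?_, ?_⟩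
      · rw [getD_set, if_pos (show C = C ∧ C < p.2.length from ⟨rfl, by rw [q3]; omega⟩)]
        unfold lastSt
        rw [src_succ, if_pos (by simpa using hbg')]
        simp [hv.symm]
      · intro c hc
        rw [getD_set, if_neg (by rintro ⟨h', _⟩; exact hc h'.symm)]
    · have hbg' : gget grid k C = bg := by rw [← hv]; exact not_not.mp hbg
      have hsrc : src grid bg C (k+1) = src grid bg C k := by
        rw [src_succ, if_neg (by simp [hbg'])]
      rcases hsk : src grid bg C k with _ | r
      · have hnone : p.2.getD C none = none := by
          rw [hp2C]; unfold lastSt; rw [hsk]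
        have hlast : last' = p.2 := by rw [hdef, if_neg hbg, hnone]
        refine ⟨hlast ▸ q3, ?_, fun c _ => by rw [hlast]⟩
        rw [hlast, hnone]
        unfold lastSt
        rw [hsrc, hsk]
      · have hsome : p.2.getD C none = some (gget grid r C, (k - 1 - r) % 2 == 0) := by
          rw [hp2C]; unfold lastSt; rw [hsk]
        have hlast : last' = p.2.set C (some (gget grid r C, !((k - 1 - r) % 2 == 0))) := by
          rw [hdef, if_neg hbg, hsome]
        refine ⟨by rw [hlast, List.length_set, q3], ?_, ?_⟩
        · rw [hlast, getD_set, if_pos (show C = C ∧ C < p.2.length from ⟨rfl, by rw [q3]; omega⟩)]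
          unfold lastSt
          rw [hsrc, hsk]
          have hrk := (src_lt grid bg C k r hsk).1
          show some (gget grid r C, !((k - 1 - r) % 2 == 0)) = some (gget grid r C, ((k + 1 - 1 - r) % 2 == 0))
          rw [show k + 1 - 1 - r = (k - 1 - r) + 1 from by omega, ← parity_flip]
        · intro c hc
          rw [hlast, getD_set, if_neg (by rintro ⟨h', _⟩; exact hc h'.symm)]
  obtain ⟨kl, kC, kne⟩ := key
  show QB grid bg cols k (C+1) (grid.getD k [])
    (match last'.getD C none with
     | some (col, even) => (p.1.set C (if even then col else 0), last')
     | none => (p.1, last'))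
  rw [kC]
  have hlastpart : ∀ c, last'.getD c none =
      if c < C + 1 then lastSt grid bg (k+1) c
      else if c < cols then lastSt grid bg k c else none := by
    intro c
    by_cases hc : c = C
    · subst hc
      rw [kC, if_pos (by omega : c < c + 1)]
    · rw [kne c hc, q4 c]
      by_cases h1 : c < C
      · rw [if_pos h1, if_pos (by omega : c < C + 1)]
      · rw [if_neg h1, if_neg (show ¬ c < C + 1 by omega)]
  rcases hfin : lastSt grid bg (k+1) C with _ | ⟨col, even⟩
  · refine ⟨q1, fun j => ?_, kl, hlastpart⟩
    rw [q2 j]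
    by_cases h1 : j < C
    · rw [if_pos h1, if_pos (by omega : j < C + 1)]
    · by_cases hj : j = C
      · rw [if_neg h1, if_pos (show j < C + 1 by omega)]
        rw [← hj] at hfin
        unfold lastSt at hfin
        rcases hs1 : src grid bg j (k+1) with _ | r
        · unfold wA
          split_ifs with hcond
          · unfold cellv
            rw [show min grid.length (k+1) = k + 1 from by omega, hs1]
            rw [hj]
            exact hv
          · rw [hj]; exact hv
        · rw [hs1] at hfin
          simp at hfin
      · rw [if_neg h1, if_neg (show ¬ j < C + 1 by omega)]
  · unfold lastSt at hfin
    rcases hs1 : src grid bg C (k+1) with _ | r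
    · rw [hs1] at hfin; simp at hfin
    rw [hs1] at hfin
    simp only [Option.some.injEq, Prod.mk.injEq] at hfin
    obtain ⟨hcol, heven⟩ := hfin
    refine ⟨by rw [List.length_set, q1], fun j => ?_, kl, hlastpart⟩
    rw [getD_set]
    by_cases hset : C = j ∧ C < p.1.length
    · rw [if_pos hset]
      obtain ⟨rfl, hCl⟩ := hset
      rw [if_pos (show C < C + 1 by omega)]
      unfold wA
      rw [q1] at hCl
      rw [if_pos (show k < grid.length ∧ C < (grid.getD k []).length ∧ C < cols from ⟨hk, hCl, hC⟩)]
      unfold cellv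
      rw [show min grid.length (k+1) = k + 1 from by omega, hs1]
      rw [← hcol, ← heven, show k + 1 - 1 - r = k - r from by omega]
      by_cases hp : (k - r) % 2 = 0 <;> simp [hp]
    · rw [if_neg hset, q2 j]
      by_cases h1 : j < C
      · rw [if_pos h1, if_pos (by omega : j < C + 1)]
      · by_cases hj : j = C
        · have hout : ¬ (C < p.1.length) := fun hcontra => hset ⟨hj.symm, hcontra⟩
          rw [q1] at hout
          rw [if_neg h1, if_pos (show j < C + 1 by omega)]
          unfold wA
          rw [if_neg (by rintro ⟨_, hb, _⟩; rw [hj] at hb; exact hout hb)]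
          rfl
        · rw [if_neg h1, if_neg (show ¬ j < C + 1 by omega)]

lemma getD_default {α : Type} (l : List α) (i : Nat) (d : α) (h : l.length ≤ i) :
    l.getD i d = d := by
  rw [List.getD_eq_getElem?_getD, List.getElem?_eq_none (by omega), Option.getD_none]

lemma rowB_step (grid : List (List Int)) (bg : Int) (cols k : Nat)
    (st : List (List Int) × List (Option (Int × Bool)))
    (hk : k < grid.length) (hP : PB grid bg cols k st)
    (row : List Int) (hrow : row = grid.getD k []) :
    PB grid bg cols (k+1)
      (let p := (List.range cols).foldl (fun (p : List Int × List (Option (Int × Bool))) c =>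
          let v := row.getD c 0
          let last :=
            if v ≠ bg then p.2.set c (some (v, true))
            else match p.2.getD c none with
              | some (col, even) => p.2.set c (some (col, !even))
              | none => p.2
          match last.getD c none with
          | some (col, even) => (p.1.set c (if even then col else 0), last)
          | none => (p.1, last)) (row, st.2)
       (st.1 ++ [p.1], p.2)) := by
  subst hrow
  obtain ⟨p1, p2, p3, p4, p5⟩ := hP
  have hQ := foldl_range_inv (P := fun C p => QB grid bg cols k C (grid.getD k []) p)
    (f := fun (p : List Int × List (Option (Int × Bool))) c =>
      let v := (grid.getD k []).getD c 0
      let last :=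
        if v ≠ bg then p.2.set c (some (v, true))
        else match p.2.getD c none with
          | some (col, even) => p.2.set c (some (col, !even))
          | none => p.2
      match last.getD c none with
      | some (col, even) => (p.1.set c (if even then col else 0), last)
      | none => (p.1, last)) cols (grid.getD k [], st.2)
    (by
      refine ⟨rfl, fun j => by rw [if_neg (by omega : ¬ j < 0)], p4, fun c => ?_⟩
      rw [p5 c, if_neg (by omega : ¬ c < 0)])
    (fun C p hC hQC => innerB_step grid bg cols k C p hk hC hQC)
  obtain ⟨q1, q2, q3, q4⟩ := hQ
  set pfin := (List.range cols).foldl _ (grid.getD k [], st.2) with hpfin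
  show PB grid bg cols (k+1) (st.1 ++ [pfin.1], pfin.2)
  have happ : ∀ i, (st.1 ++ [pfin.1]).getD i [] =
      if i < k then st.1.getD i [] else if i = k then pfin.1 else [] := by
    intro i
    by_cases h1 : i < k
    · rw [if_pos h1, List.getD_eq_getElem?_getD,
        List.getElem?_append_left (by rw [p1]; exact h1), ← List.getD_eq_getElem?_getD]
    · rw [if_neg h1]
      by_cases h2 : i = k
      · subst h2
        rw [if_pos rfl, List.getD_eq_getElem?_getD, List.getElem?_append_right (by rw [p1]), p1]
        simp
      · rw [if_neg h2, getD_default _ _ _ (by simp [p1]; omega)]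
  refine ⟨by simp [p1], fun i hi => ?_, fun i j hi => ?_, q3, fun c => ?_⟩
  · rw [happ i]
    by_cases h1 : i < k
    · rw [if_pos h1]
      exact p2 i h1
    · have h2 : i = k := by omega
      rw [if_neg h1, if_pos h2, q1, h2]
  · rw [happ i]
    by_cases h1 : i < k
    · rw [if_pos h1]
      exact p3 i j h1
    · have h2 : i = k := by omega
      subst h2
      rw [if_neg h1, if_pos rfl, q2 j]
      split_ifs with hj
      · rfl
      · unfold wA
        rw [if_neg (by rintro ⟨_, _, hcc⟩; exact hj hcc)]
        rfl
  · rw [q4 c]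
    by_cases h1 : c < cols
    · rw [if_pos h1]
      split_ifs <;> rfl
    · rw [if_neg h1, if_neg (by omega : ¬ c < cols), if_neg h1]

lemma transformB_pt (grid : List (List Int)) :
    PB grid (findBg grid) (grid.headD []).length grid.length
      (grid.foldl (fun (st : List (List Int) × List (Option (Int × Bool))) row =>
        let p := (List.range (grid.headD []).length).foldl
          (fun (p : List Int × List (Option (Int × Bool))) c =>
            let v := row.getD c 0
            let last :=
              if v ≠ findBg grid then p.2.set c (some (v, true))
              else match p.2.getD c none with
                | some (col, even) => p.2.set c (some (col, !even))
                | none => p.2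
            match last.getD c none with
            | some (col, even) => (p.1.set c (if even then col else 0), last)
            | none => (p.1, last)) (row, st.2)
        (st.1 ++ [p.1], p.2)) ([], List.replicate (grid.headD []).length none)) := by
  apply foldl_idx_inv (P := fun k st => PB grid (findBg grid) (grid.headD []).length k st)
  · refine ⟨rfl, fun i hi => by omega, fun i j hi => by omega, by simp, fun c => ?_⟩
    by_cases h1 : c < (grid.headD []).length
    · rw [if_pos h1, List.getD_eq_getElem?_getD, List.getElem?_replicate, if_pos h1]
      unfold lastSt src
      simp
    · rw [if_neg h1, getD_default _ _ _ (by rw [List.length_replicate]; omega)]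
  · intro k st hk hPk
    exact rowB_step grid (findBg grid) (grid.headD []).length k st hk hPk grid[k]
      (by rw [List.getD_eq_getElem?_getD, List.getElem?_eq_getElem hk]; rfl)

theorem AB_eq (grid : List (List Int)) : transform grid = transform_alt grid := by
  obtain ⟨a1, a2, a3⟩ := transformA_pt grid
  obtain ⟨b1, b2, b3, _, _⟩ := transformB_pt grid
  have hb1 : (transform_alt grid).length = grid.length := b1
  have hb2 : ∀ i, i < grid.length →
      ((transform_alt grid).getD i []).length = (grid.getD i []).length := b2
  have hb3 : ∀ i j, i < grid.length →
      ((transform_alt grid).getD i []).getD j 0 =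
        wA grid (findBg grid) (grid.headD []).length grid.length i j := b3
  apply ext2
  · exact a1.trans hb1.symm
  · intro i
    rw [a2 i]
    by_cases hi : i < grid.length
    · exact (hb2 i hi).symm
    · rw [getD_default grid _ _ (by omega), getD_default (transform_alt grid) _ _ (by omega)]
  · intro i j
    rw [a3 i j]
    by_cases hi : i < grid.length
    · exact (hb3 i j hi).symm
    · unfold wA
      rw [if_neg (by rintro ⟨h, _⟩; exact hi h)]
      rw [getD_default (transform_alt grid) _ _ (by omega)]
      unfold gget
      rw [getD_default grid _ _ (by omega)]

-- ===== VERDICT (by name: the statement is the Claim_ definition above) =====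
theorem transform_spec : Claim_equal_transform := by
  intro grid _ _
  show transform grid = transform_alt grid
  exact AB_eq grid
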